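-- pv_equiv track=rewrite | github.com/prexen/prxPython | prxResultParser.py | getPriceInTextFormat
-- ===== SOURCE A (Python) =====
-- def getPriceInTextFormat(searchTerm, textToSearch):
--     sizeOfSearchParameter = len(searchTerm)
--     startingIndex = textToSearch.find(searchTerm)
--     totalChars = len(textToSearch)
--
--     stringFinal = ""
--     priceCounter = 0
--     lastTwoDigits = False
--     finalCounter = 0
--     while(True):
--
--         currentIndex = startingIndex + sizeOfSearchParameter + priceCounter
--         if(currentIndex >= totalChars):
--             break
--
--         characterInString = textToSearch[startingIndex + sizeOfSearchParameter + priceCounter]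
--         if(characterInString == ','):
--             lastTwoDigits = True
--         if(lastTwoDigits):
--             finalCounter += 1
--             if(finalCounter > 3):
--                 break
--
--         stringFinal += characterInString
--         priceCounter += 1
--     return stringFinal
-- ===== SOURCE B (Python) =====
-- def getPriceInTextFormat(searchTerm, textToSearch):
--     start = textToSearch.find(searchTerm) + len(searchTerm)
--     tail = textToSearch[start:]
--     comma = tail.find(',')
--     if comma == -1:
--         return tail
--     return tail[:comma + 3]
-- ===== Notes on version B (the rewrite author's own statement) =====
-- stated objective: simpler
-- what changed: Replaces A's char-by-char while-loop with flag and counter state by a direct find+slice: start = find(term)+len(term), tail = text[start:], and either the whole tail (no comma) or tail[:comma+3].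
import Mathlib
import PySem

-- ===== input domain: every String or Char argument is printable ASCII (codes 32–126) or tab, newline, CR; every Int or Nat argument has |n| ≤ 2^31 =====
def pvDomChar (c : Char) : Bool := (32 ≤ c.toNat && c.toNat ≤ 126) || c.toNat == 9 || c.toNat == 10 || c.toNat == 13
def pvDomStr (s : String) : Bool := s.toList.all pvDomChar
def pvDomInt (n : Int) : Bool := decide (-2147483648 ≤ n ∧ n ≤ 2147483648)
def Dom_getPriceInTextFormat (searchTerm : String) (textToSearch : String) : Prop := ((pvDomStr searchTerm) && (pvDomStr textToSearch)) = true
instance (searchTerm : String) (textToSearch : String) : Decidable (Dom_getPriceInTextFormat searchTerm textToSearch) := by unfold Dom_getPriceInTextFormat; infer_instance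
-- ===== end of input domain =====

-- B replaces A's character-by-character accumulator loop by find + two slices (simpler, same result).

-- ===== PORT A =====
-- A's while(True) loop; fuel only makes the recursion total (one unit per iteration,
-- fuel = length + 1 is never exhausted since the loop stops once the index reaches the length).
def pvALoop (fuel : Nat) (textToSearch : List Char) (base totalChars : Int)
    (stringFinal : List Char) (priceCounter : Int) (lastTwoDigits : Bool) (finalCounter : Int) : List Char :=
  match fuel with
  | 0 => stringFinal
  | fuel + 1 =>
    let currentIndex := base + priceCounter
    if currentIndex ≥ totalChars then stringFinal
    else
      match PySem.List.pyGet? textToSearch (base + priceCounter) with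
      | none => stringFinal   -- unreachable: the index was just checked to be in range
      | some characterInString =>
        let lastTwoDigits := if characterInString = ',' then true else lastTwoDigits
        if lastTwoDigits then
          let finalCounter := finalCounter + 1
          if finalCounter > 3 then stringFinal
          else pvALoop fuel textToSearch base totalChars (stringFinal ++ [characterInString])
                 (priceCounter + 1) lastTwoDigits finalCounter
        else pvALoop fuel textToSearch base totalChars (stringFinal ++ [characterInString])
                 (priceCounter + 1) lastTwoDigits finalCounter

def getPriceInTextFormat (searchTerm : String) (textToSearch : String) : String :=
  let sizeOfSearchParameter : Int := PySem.Str.len searchTerm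
  let startingIndex : Int := PySem.Str.find textToSearch searchTerm
  let totalChars : Int := PySem.Str.len textToSearch
  String.ofList (pvALoop (textToSearch.toList.length + 1) textToSearch.toList
    (startingIndex + sizeOfSearchParameter) totalChars [] 0 false 0)

-- ===== PORT B =====
def getPriceInTextFormat_alt (searchTerm : String) (textToSearch : String) : String :=
  let start : Int := PySem.Str.find textToSearch searchTerm + PySem.Str.len searchTerm
  let tail : List Char := PySem.List.slice textToSearch.toList (some start) none
  let comma : Int := PySem.Chars.find tail [',']
  if comma = -1 then String.ofList tail
  else String.ofList (PySem.List.slice tail none (some (comma + 3)))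

-- ===== PRECONDITION & SPEC =====
def Spec_getPriceInTextFormat (searchTerm : String) (textToSearch : String) (out : String) : Prop := out = getPriceInTextFormat_alt searchTerm textToSearch
instance (searchTerm : String) (textToSearch : String) (out : String) : Decidable (Spec_getPriceInTextFormat searchTerm textToSearch out) := by unfold Spec_getPriceInTextFormat; infer_instance

-- ===== CLAIM (what is proved, stated in full; the proofs are below) =====
def Claim_equal_getPriceInTextFormat : Prop := ∀ (searchTerm : String) (textToSearch : String), Dom_getPriceInTextFormat searchTerm textToSearch → Spec_getPriceInTextFormat searchTerm textToSearch (getPriceInTextFormat searchTerm textToSearch)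

-- ===== LEMMAS AND PROOFS =====

-- A's loop, abstracted to the tail of the text it actually walks (proof helper only).
def pvSpecLoop : List Char → Bool → Int → List Char
  | [], _, _ => []
  | ch :: rest, flag, fc =>
    let flag' := if ch = ',' then true else flag
    if flag' then (if fc + 1 > 3 then [] else ch :: pvSpecLoop rest flag' (fc + 1))
    else ch :: pvSpecLoop rest flag' fc

theorem pvALoop_eq (text : List Char) : ∀ (fuel : Nat) (s p : Nat) (acc : List Char) (flag : Bool) (fc : Int),
    text.length ≤ s + p + fuel →
    pvALoop fuel text (s : Int) (text.length : Int) acc (p : Int) flag fc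
      = acc ++ pvSpecLoop (text.drop (s + p)) flag fc := by
  intro fuel
  induction fuel with
  | zero =>
    intro s p acc flag fc hle
    have : text.drop (s + p) = [] := List.drop_eq_nil_of_le (by omega)
    simp [pvALoop, this, pvSpecLoop]
  | succ fuel ih =>
    intro s p acc flag fc hle
    by_cases hidx : text.length ≤ s + p
    · have : text.drop (s + p) = [] := List.drop_eq_nil_of_le hidx
      rw [pvALoop]
      simp only []
      rw [if_pos (by exact_mod_cast Int.ofNat_le.mpr hidx)]
      simp [this, pvSpecLoop]
    · have hlt : s + p < text.length := by omega
      have hcast : (s : Int) + (p : Int) = ((s + p : Nat) : Int) := by push_cast; ring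
      rw [pvALoop]
      simp only []
      rw [if_neg (by omega), hcast, PySem.List.pyGet?_natCast,
          List.getElem?_eq_getElem hlt]
      simp only []
      have hdrop : text.drop (s + p) = text[s + p] :: text.drop (s + p + 1) :=
        List.drop_eq_getElem_cons hlt
      rw [hdrop, pvSpecLoop]
      have hsucc : (p : Int) + 1 = ((p + 1 : Nat) : Int) := by push_cast; ring
      by_cases hch : text[s + p] = ','
      · simp only [hch, if_true]
        by_cases hfc : fc + 1 > 3
        · simp [hfc]
        · rw [if_neg hfc, if_neg hfc, hsucc,
            ih s (p + 1) (acc ++ [',']) true (fc + 1) (by omega)]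
          have : s + (p + 1) = s + p + 1 := by omega
          simp [this]
      · simp only [if_neg hch]
        cases flag with
        | true =>
          simp only []
          by_cases hfc : fc + 1 > 3
          · simp [hfc]
          · rw [if_neg hfc, if_neg hfc, hsucc,
              ih s (p + 1) (acc ++ [text[s + p]]) true (fc + 1) (by omega)]
            have : s + (p + 1) = s + p + 1 := by omega
            simp [this]
        | false =>
          simp only [Bool.false_eq_true]
          rw [hsucc, ih s (p + 1) (acc ++ [text[s + p]]) false fc (by omega)]
          have : s + (p + 1) = s + p + 1 := by omega
          simp [this]

theorem pvSpecLoop_true (l : List Char) : ∀ (fc : Int),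
    pvSpecLoop l true fc = l.take (3 - fc).toNat := by
  induction l with
  | nil => intro fc; simp [pvSpecLoop]
  | cons ch rest ih =>
    intro fc
    rw [pvSpecLoop]
    simp only [ite_self, if_true]
    by_cases hfc : fc + 1 > 3
    · rw [if_pos hfc]
      have : (3 - fc).toNat = 0 := by omega
      simp [this]
    · rw [if_neg hfc, ih (fc + 1)]
      have : (3 - fc).toNat = (3 - (fc + 1)).toNat + 1 := by omega
      simp [this]

theorem pvSpecLoop_main (l : List Char) : pvSpecLoop l false 0 =
    match l.findIdx? (· == ',') with
    | none => l
    | some i => l.take (i + 3) := by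
  induction l with
  | nil => simp [pvSpecLoop]
  | cons ch rest ih =>
    rw [pvSpecLoop, List.findIdx?_cons]
    by_cases hch : ch = ','
    · simp only [hch, if_true, beq_self_eq_true,
        if_neg (by omega : ¬ ((0:Int) + 1 > 3))]
      rw [pvSpecLoop_true rest (0 + 1)]
      norm_num [List.take_succ_cons]
      congr 1
    · simp only [beq_iff_eq, if_neg hch]
      rw [ih]
      cases h : rest.findIdx? (· == ',') with
      | none => simp
      | some i =>
        simp only [Option.map_some]
        have : i + 1 + 3 = (i + 3) + 1 := by omega
        simp [this]

theorem pv_singleton_prefix (a : Char) (m : List Char) : [a] <+: m ↔ m.head? = some a := by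
  cases m with
  | nil => simp
  | cons x t => simp [List.cons_prefix_cons, eq_comm]

-- first index of a one-character needle = List.findIdx?
theorem pv_find_singleton (l : List Char) (a : Char) :
    PySem.Chars.find l [a] = match l.findIdx? (· == a) with | none => -1 | some i => (i : Int) := by
  cases h : l.findIdx? (· == a) with
  | none =>
    have hnm : a ∉ l := by
      intro hmem
      rcases List.findIdx?_eq_none_iff.mp h a hmem with h'
      simp at h'
    simp only []
    exact (PySem.Chars.find_eq_neg_one_iff l [a]).mpr (by simpa [List.singleton_infix_iff] using hnm)
  | some i =>
    have hi := List.findIdx?_eq_some_iff_findIdx_eq.mp h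
    have hlt : i < l.length := hi.1
    have hgi : l[i]? = some a := by
      have := List.findIdx?_eq_some_iff_getElem.mp h
      rcases this with ⟨h1, h2, _⟩
      simp at h2
      simp [List.getElem?_eq_getElem h1, h2]
    have hmin : ∀ j < i, l[j]? ≠ some a := by
      intro j hj hja
      rcases List.findIdx?_eq_some_iff_getElem.mp h with ⟨h1, _, h3⟩
      have := h3 j hj
      have hjl : j < l.length := by omega
      simp [List.getElem?_eq_getElem hjl] at hja
      simp [hja] at this
    have hin : [a] <:+: l := (List.singleton_infix_iff a l).mpr (List.mem_of_getElem? hgi)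
    have higen : 0 ≤ PySem.Chars.find l [a] := (PySem.Chars.find_nonneg_iff l [a]).mpr hin
    rcases PySem.Chars.find_spec higen with ⟨hpre, hminf⟩
    set f := (PySem.Chars.find l [a]).toNat with hf
    have hff : [a] <+: l.drop f := hpre
    have hfa : l[f]? = some a := by
      rw [pv_singleton_prefix] at hff
      simpa [List.head?_drop] using hff
    have h1 : ¬ i < f := by
      intro hlt'
      exact hminf i hlt' ((pv_singleton_prefix a (l.drop i)).mpr (by simpa [List.head?_drop] using hgi))
    have h2 : ¬ f < i := fun hlt' => hmin f hlt' hfa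
    have : f = i := by omega
    simp only []
    omega

-- startingIndex + len(searchTerm) is never negative: find ≥ 0, or find = -1 with a nonempty needle
theorem pv_start_nonneg (t sub : List Char) : 0 ≤ PySem.Chars.find t sub + (sub.length : Int) := by
  rcases lt_or_ge (PySem.Chars.find t sub) 0 with hneg | hpos
  · have hm1 : PySem.Chars.find t sub = -1 := by
      have := PySem.Chars.neg_one_le_find t sub
      omega
    have hsub : sub ≠ [] := by
      intro hnil
      rw [hnil, PySem.Chars.find_nil] at hm1
      omega
    have : 0 < sub.length := List.length_pos_iff.mpr hsub
    omega
  · omega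

-- ===== VERDICT (by name: the statement is the Claim_ definition above) =====
-- ===== VERDICT (by name: the statement is the Claim_ definition above) =====
theorem getPriceInTextFormat_spec : Claim_equal_getPriceInTextFormat := by
  intro searchTerm textToSearch _
  unfold Spec_getPriceInTextFormat getPriceInTextFormat getPriceInTextFormat_alt
  simp only [PySem.Str.find_eq, PySem.Str.len]
  set tl := textToSearch.toList with htl
  set sub := searchTerm.toList with hsub
  have hnn : 0 ≤ PySem.Chars.find tl sub + (sub.length : Int) := pv_start_nonneg tl sub
  set st : Int := PySem.Chars.find tl sub + (sub.length : Int) with hst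
  have hcast : ((st.toNat : Nat) : Int) = st := Int.toNat_of_nonneg hnn
  -- A's side: the loop computes pvSpecLoop on the tail of the text
  have hA : pvALoop (tl.length + 1) tl st ((tl.length : Nat) : Int) [] 0 false 0
      = pvSpecLoop (tl.drop st.toNat) false 0 := by
    have h := pvALoop_eq tl (tl.length + 1) st.toNat 0 [] false 0 (by omega)
    rw [hcast] at h
    simpa using h
  rw [hA, pvSpecLoop_main]
  -- B's side
  rw [PySem.List.slice_from tl hnn]
  rw [pv_find_singleton (tl.drop st.toNat) ',']
  cases h : (tl.drop st.toNat).findIdx? (· == ',') with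
  | none => simp
  | some i =>
    simp only []
    rw [if_neg (by omega : ¬ ((i : Int) = -1))]
    rw [PySem.List.slice_to _ (by omega : (0:Int) ≤ (i : Int) + 3)]
    have : ((i : Int) + 3).toNat = i + 3 := by omega
    rw [this]
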